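-- pv_equiv track=rewrite | github.com/nkw011/algorithm_training | baekjoon/graph/1043_lie.py | myResult
-- ===== SOURCE A (Python) =====
-- def findParent(parent,x):
--     if parent[x] != x:
--         parent[x] = findParent(parent,parent[x])
--     return parent[x]
--
-- def union(parent,a,b):
--     a = findParent(parent,a)
--     b = findParent(parent,b)
--     if a < b:
--         parent[b] = a
--     else :
--         parent[a] = b
--
-- def myResult(n,m,know,parties):
--     parent = [i for i in range(n+1)]
--     result = 0
--     party= []
--
--     for i in range(m):
--         nums = parties[i]
--         leng = nums[0]
--         for i in range(leng-1):
--             if findParent(parent,nums[i+1]) != findParent(parent,nums[i+2]):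
--                 union(parent,nums[i+1],nums[i+2])
--         party.append(nums[1:])
--
--     root = set()
--     for num in know[1:] :
--         root.add(findParent(parent,num))
--
--     for p in party:
--         possible = True
--         for num in p:
--             if findParent(parent,num) in root:
--                 possible = False
--                 root.add(num)
--         if possible:
--             result += 1
--     return result
-- ===== SOURCE B (Python) =====
-- def myResult(n, m, know, parties):
--     # Quick-find: comp[x] is the (minimum) label of x's component, kept exact
--     # by eagerly relabelling a whole component on every merge.
--     comp = list(range(n + 1))
--     party = []
--     for i in range(m):
--         nums = parties[i]
--         leng = nums[0]
--         for u, v in zip(nums[1:leng], nums[2:leng + 1]):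
--             cu, cv = comp[u], comp[v]
--             if cu != cv:
--                 lo, hi = (cu, cv) if cu < cv else (cv, cu)
--                 comp = [lo if c == hi else c for c in comp]
--         party.append(nums[1:])
--     root = {comp[x] for x in know[1:]}
--     result = 0
--     for p in party:
--         ok = True
--         for num in p:
--             if comp[num] in root:
--                 ok = False
--                 root.add(num)
--         if ok:
--             result += 1
--     return result
-- ===== Notes on version B (the rewrite author's own statement) =====
-- stated objective: simpler
-- what changed: Replaces the recursive union-find with path compression (parent forest, findParent/union) by a flat quick-find array comp[x] = component minimum, merging by eagerly relabelling one component per edge, so all later lookups are single reads with no recursion or mutation. Pre_ additionally excludes parties whose declared count nums[0] is negative and reaches members (nums[0] + len(nums) > 1): malformed input on which A silently unions nothing while B's slices read members from the tail.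
-- outside the precondition, e.g. on myResult(4, 2, [9, 1], [[-2, 1, 2, 3, 4], [1, 3]]): A returns 1, B returns 0
import Mathlib
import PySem

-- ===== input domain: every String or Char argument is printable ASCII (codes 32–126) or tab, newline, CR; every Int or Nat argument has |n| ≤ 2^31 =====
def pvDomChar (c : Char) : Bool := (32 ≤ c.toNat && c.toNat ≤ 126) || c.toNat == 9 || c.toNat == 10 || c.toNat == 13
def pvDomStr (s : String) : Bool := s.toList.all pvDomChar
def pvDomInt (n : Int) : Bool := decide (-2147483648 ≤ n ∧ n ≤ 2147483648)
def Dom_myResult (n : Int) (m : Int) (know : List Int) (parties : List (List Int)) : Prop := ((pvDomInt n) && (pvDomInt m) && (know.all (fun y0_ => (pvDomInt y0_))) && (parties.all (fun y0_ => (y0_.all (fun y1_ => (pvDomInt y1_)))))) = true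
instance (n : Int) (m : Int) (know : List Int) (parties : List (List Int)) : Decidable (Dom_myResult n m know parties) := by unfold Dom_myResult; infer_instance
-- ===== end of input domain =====

-- B replaces A's recursive path-compressing union-find by a flat quick-find array of
-- component minima with eager relabelling on each merge (simpler: no recursion, no mutation
-- of a parent forest); A also mutates no argument, only its local parent list.

-- ===== PORT A =====
-- findParent(parent, x): recursive find with path compression.  The fuel argument only
-- makes the Python recursion structural; under Pre_ it never runs out (proved below).
def pvFind : Nat → List Int → Int → List Int × Int
  | 0, parent, x => (parent, x)
  | f+1, parent, x =>
    let px := PySem.List.pyGetD parent x 0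
    if px ≠ x then
      let pr := pvFind f parent px
      (PySem.List.pySetD pr.1 x pr.2, pr.2)
    else (parent, px)

-- union(parent, a, b)
def pvUnion (parent : List Int) (a b : Int) : List Int :=
  let fa := pvFind (parent.length + 1) parent a
  let fb := pvFind (fa.1.length + 1) fa.1 b
  if fa.2 < fb.2 then PySem.List.pySetD fb.1 fb.2 fa.2
  else PySem.List.pySetD fb.1 fa.2 fb.2

-- body of `for i in range(leng-1): ...`
def aEdge (nums : List Int) (parent : List Int) (i : Int) : List Int :=
  let fu := pvFind (parent.length + 1) parent (PySem.List.pyGetD nums (i+1) 0)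
  let fv := pvFind (fu.1.length + 1) fu.1 (PySem.List.pyGetD nums (i+2) 0)
  if fu.2 ≠ fv.2 then pvUnion fv.1 (PySem.List.pyGetD nums (i+1) 0) (PySem.List.pyGetD nums (i+2) 0)
  else fv.1

-- body of `for i in range(m): ...` over state (parent, party)
def aParty (parties : List (List Int)) (st : List Int × List (List Int)) (i : Int) :
    List Int × List (List Int) :=
  let nums := PySem.List.pyGetD parties i []
  let leng := PySem.List.pyGetD nums 0 0
  let parent := (PySem.List.pyRange 0 (leng - 1) 1).foldl (aEdge nums) st.1
  (parent, st.2 ++ [PySem.List.slice nums (some 1) none])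

-- body of `for num in know[1:]: root.add(findParent(parent, num))` over state (parent, root)
def aKnow (st : List Int × PySem.Set Int) (num : Int) : List Int × PySem.Set Int :=
  let f := pvFind (st.1.length + 1) st.1 num
  (f.1, PySem.Set.add st.2 f.2)

-- body of `for num in p: ...` over state (parent, root, possible)
def aCheck (st : List Int × PySem.Set Int × Bool) (num : Int) : List Int × PySem.Set Int × Bool :=
  let f := pvFind (st.1.length + 1) st.1 num
  if PySem.Set.contains st.2.1 f.2 then (f.1, PySem.Set.add st.2.1 num, false)
  else (f.1, st.2.1, st.2.2)

-- body of `for p in party: ...` over state (parent, root, result)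
def aPartyLoop (st : List Int × PySem.Set Int × Int) (p : List Int) :
    List Int × PySem.Set Int × Int :=
  let r := p.foldl aCheck (st.1, st.2.1, true)
  (r.1, r.2.1, if r.2.2 then st.2.2 + 1 else st.2.2)

def myResult (n : Int) (m : Int) (know : List Int) (parties : List (List Int)) : Int :=
  let parent := PySem.List.pyRange 0 (n + 1) 1
  let s1 := (PySem.List.pyRange 0 m 1).foldl (aParty parties) (parent, [])
  let s2 := (PySem.List.slice know (some 1) none).foldl aKnow (s1.1, PySem.Set.empty)
  let s3 := s1.2.foldl aPartyLoop (s2.1, s2.2, 0)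
  s3.2.2

-- ===== PORT B =====
-- body of `for u, v in zip(nums[1:leng], nums[2:leng+1]): ...`
def bMerge (comp : List Int) (uv : Int × Int) : List Int :=
  let cu := PySem.List.pyGetD comp uv.1 0
  let cv := PySem.List.pyGetD comp uv.2 0
  if cu ≠ cv then
    let lo := if cu < cv then cu else cv
    let hi := if cu < cv then cv else cu
    comp.map (fun c => if c = hi then lo else c)
  else comp

-- body of `for i in range(m): ...` over state (comp, party)
def bParty (parties : List (List Int)) (st : List Int × List (List Int)) (i : Int) :
    List Int × List (List Int) :=
  let nums := PySem.List.pyGetD parties i []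
  let leng := PySem.List.pyGetD nums 0 0
  let pairs := (PySem.List.slice nums (some 1) (some leng)).zip
               (PySem.List.slice nums (some 2) (some (leng + 1)))
  (pairs.foldl bMerge st.1, st.2 ++ [PySem.List.slice nums (some 1) none])

-- body of `for num in p: ...` over state (root, ok); comp is read-only here
def bCheck (comp : List Int) (st : PySem.Set Int × Bool) (num : Int) : PySem.Set Int × Bool :=
  if PySem.Set.contains st.1 (PySem.List.pyGetD comp num 0) then (PySem.Set.add st.1 num, false)
  else st

-- body of `for p in party: ...` over state (root, result)
def bPartyLoop (comp : List Int) (st : PySem.Set Int × Int) (p : List Int) : PySem.Set Int × Int :=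
  let r := p.foldl (bCheck comp) (st.1, true)
  (r.1, if r.2 then st.2 + 1 else st.2)

def myResult_alt (n : Int) (m : Int) (know : List Int) (parties : List (List Int)) : Int :=
  let s1 := (PySem.List.pyRange 0 m 1).foldl (bParty parties) (PySem.List.pyRange 0 (n + 1) 1, [])
  let root := (PySem.List.slice know (some 1) none).foldl
      (fun r x => PySem.Set.add r (PySem.List.pyGetD s1.1 x 0)) PySem.Set.empty
  let s3 := s1.2.foldl (bPartyLoop s1.1) (root, 0)
  s3.2

-- ===== PRECONDITION & SPEC =====
-- Pre_ excludes (a) inputs where A raises: m > len(parties), an empty party line, a declared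
-- count nums[0] exceeding the members present, or a member/known person outside the valid
-- index range [-(n+1), n] of the parent list; and (b) parties whose declared count nums[0]
-- is negative AND reaches members (nums[0] + len(nums) > 1) — malformed input (a count
-- cannot be negative) on which A silently unions nothing while B's slice arithmetic reads
-- members from the tail of the line.
def Pre_myResult (n : Int) (m : Int) (know : List Int) (parties : List (List Int)) : Prop :=
  m ≤ (parties.length : Int) ∧
  (∀ nums ∈ parties.take m.toNat,
      nums ≠ [] ∧
      (0 ≤ nums.headI → (nums.headI ≤ 1 ∨ nums.headI ≤ (nums.length : Int) - 1)) ∧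
      (nums.headI < 0 → nums.headI + (nums.length : Int) ≤ 1) ∧
      ∀ x ∈ nums.tail, -(n+1) ≤ x ∧ x ≤ n) ∧
  (∀ x ∈ know.tail, -(n+1) ≤ x ∧ x ≤ n)
instance (n : Int) (m : Int) (know : List Int) (parties : List (List Int)) :
    Decidable (Pre_myResult n m know parties) := by unfold Pre_myResult; infer_instance

def pvWitness_myResult : Int × Int × List Int × List (List Int) := (2, 1, [1, 1], [[2, 1, 2]])

def Spec_myResult (n : Int) (m : Int) (know : List Int) (parties : List (List Int)) (out : Int) : Prop := out = myResult_alt n m know parties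
instance (n : Int) (m : Int) (know : List Int) (parties : List (List Int)) (out : Int) : Decidable (Spec_myResult n m know parties out) := by unfold Spec_myResult; infer_instance

-- ===== CLAIM (what is proved, stated in full; the proofs are below) =====
def Claim_equal_myResult : Prop := ∀ (n : Int) (m : Int) (know : List Int) (parties : List (List Int)), Dom_myResult n m know parties → Pre_myResult n m know parties → Spec_myResult n m know parties (myResult n m know parties)

-- ===== LEMMAS AND PROOFS =====

def UFInv (p : List Int) : Prop := ∀ i, i < p.length → 0 ≤ p.getD i 0 ∧ p.getD i 0 ≤ (i : Int)

def rootF : Nat → List Int → Nat → Int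
  | 0, _, i => (i : Int)
  | f+1, p, i => if p.getD i 0 = (i : Int) then (i : Int) else rootF f p (p.getD i 0).toNat

def rootOf (p : List Int) (i : Nat) : Int := rootF (i + 1) p i

lemma rootF_fuel (p : List Int) (hp : UFInv p) :
    ∀ i, i < p.length → ∀ f, i + 1 ≤ f → rootF f p i = rootOf p i := by
  intro i
  induction i using Nat.strong_induction_on with
  | _ i IH =>
    intro hi f hf
    obtain ⟨f', rfl⟩ : ∃ f', f = f' + 1 := ⟨f - 1, by omega⟩
    unfold rootOf
    simp only [rootF]
    by_cases he : p.getD i 0 = (i : Int)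
    · rw [if_pos he, if_pos he]
    · have hb := hp i hi
      have hlt : (p.getD i 0).toNat < i := by omega
      rw [if_neg he, if_neg he,
        IH _ hlt (by omega) f' (by omega), IH _ hlt (by omega) i (by omega)]

lemma rootOf_step (p : List Int) (hp : UFInv p) (i : Nat) (hi : i < p.length) :
    rootOf p i = if p.getD i 0 = (i : Int) then (i : Int) else rootOf p (p.getD i 0).toNat := by
  conv_lhs => unfold rootOf rootF
  by_cases he : p.getD i 0 = (i : Int)
  · rw [if_pos he, if_pos he]
  · have hb := hp i hi
    have hlt : (p.getD i 0).toNat < i := by omega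
    rw [if_neg he, if_neg he]
    exact rootF_fuel p hp _ (by omega) i (by omega)

lemma rootOf_spec (p : List Int) (hp : UFInv p) (i : Nat) (hi : i < p.length) :
    0 ≤ rootOf p i ∧ rootOf p i ≤ (i : Int) ∧ p.getD (rootOf p i).toNat 0 = rootOf p i := by
  induction i using Nat.strong_induction_on with
  | _ i IH =>
    rw [rootOf_step p hp i hi]
    by_cases he : p.getD i 0 = (i : Int)
    · rw [if_pos he]
      exact ⟨by omega, by omega, by simpa using he⟩
    · have hb := hp i hi
      have hlt : (p.getD i 0).toNat < i := by omega
      rw [if_neg he]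
      have := IH _ hlt (by omega)
      exact ⟨this.1, by omega, this.2.2⟩

lemma rootOf_idem (p : List Int) (hp : UFInv p) (i : Nat) (hi : i < p.length) :
    rootOf p (rootOf p i).toNat = rootOf p i := by
  have h := rootOf_spec p hp i hi
  rw [rootOf_step p hp _ (by omega), Int.toNat_of_nonneg h.1, if_pos h.2.2]

lemma getD_set_len (p : List Int) (j : Nat) (v : Int) (i : Nat) (hi : i < p.length) :
    (p.set j v).getD i 0 = if i = j then v else p.getD i 0 := by
  rcases eq_or_ne i j with rfl | hne
  · simp [List.getD_eq_getElem?_getD, List.getElem?_set_self hi]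
  · simp [List.getD_eq_getElem?_getD, List.getElem?_set_ne (Ne.symm hne), hne]

lemma write_preserve (p : List Int) (hp : UFInv p) (j : Nat) (hj : j < p.length)
    (v : Int) (hv0 : 0 ≤ v) (hvle : v ≤ p.getD j 0) (hvr : rootOf p v.toNat = rootOf p j) :
    UFInv (p.set j v) ∧ ∀ i, i < p.length → rootOf (p.set j v) i = rootOf p i := by
  have hlen : (p.set j v).length = p.length := by simp
  have hinv : UFInv (p.set j v) := by
    intro i hi
    rw [hlen] at hi
    rw [getD_set_len p j v i hi]
    split_ifs with h
    · subst h; exact ⟨hv0, le_trans hvle (hp i hi).2⟩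
    · exact hp i hi
  refine ⟨hinv, ?_⟩
  intro i
  induction i using Nat.strong_induction_on with
  | _ i IH =>
    intro hi
    rw [rootOf_step _ hinv i (by omega), getD_set_len p j v i hi]
    rcases eq_or_ne i j with rfl | hne
    · rw [if_pos rfl]
      by_cases hv : v = (i : Int)
      · have hb := hp i hi
        have hroot : p.getD i 0 = (i : Int) := by omega
        rw [hv, rootOf_step p hp i hi, if_pos hroot, if_pos rfl]
      · have hvlt : v.toNat < i := by
          have hb := hp i hi; omega
        rw [if_neg hv, IH _ hvlt (by omega), hvr]
    · rw [if_neg hne]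
      by_cases he : p.getD i 0 = (i : Int)
      · rw [if_pos he, rootOf_step p hp i hi, if_pos he]
      · have hb := hp i hi
        have hlt : (p.getD i 0).toNat < i := by omega
        rw [if_neg he, IH _ hlt (by omega), rootOf_step p hp i hi, if_neg he]

lemma write_merge (p : List Int) (hp : UFInv p) (lo hi : Nat)
    (hlo : lo < p.length) (hhi : hi < p.length) (hlt : lo < hi)
    (hflo : p.getD lo 0 = (lo : Int)) (hfhi : p.getD hi 0 = (hi : Int)) :
    UFInv (p.set hi (lo : Int)) ∧ ∀ i, i < p.length →
      rootOf (p.set hi (lo : Int)) i =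
        if rootOf p i = (hi : Int) then (lo : Int) else rootOf p i := by
  have hlen : (p.set hi (lo:Int)).length = p.length := by simp
  have hinv : UFInv (p.set hi (lo:Int)) := by
    intro i h
    rw [hlen] at h
    rw [getD_set_len p hi _ i h]
    split_ifs with hcase
    · subst hcase; constructor <;> omega
    · exact hp i h
  refine ⟨hinv, ?_⟩
  intro i
  induction i using Nat.strong_induction_on with
  | _ i IH =>
    intro h
    rw [rootOf_step _ hinv i (by omega), getD_set_len p hi _ i h]
    rcases eq_or_ne i hi with rfl | hne
    · rw [if_pos rfl]
      have hroot_i : rootOf p i = (i : Int) := by rw [rootOf_step p hp i h, if_pos hfhi]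
      have hroot_lo : rootOf p lo = (lo : Int) := by rw [rootOf_step p hp lo hlo, if_pos hflo]
      rw [if_neg (by omega), Int.toNat_natCast, IH lo hlt hlo, hroot_lo,
        if_neg (by omega), if_pos hroot_i]
    · rw [if_neg hne]
      by_cases he : p.getD i 0 = (i : Int)
      · have hroot_i : rootOf p i = (i : Int) := by rw [rootOf_step p hp i h, if_pos he]
        rw [if_pos he, hroot_i, if_neg (by intro hh; exact hne (by exact_mod_cast hh))]
      · have hb := hp i h
        have hlt2 : (p.getD i 0).toNat < i := by omega
        rw [if_neg he, IH _ hlt2 (by omega), rootOf_step p hp i h, if_neg he]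

def nIdx (L : Nat) (x : Int) : Nat := if 0 ≤ x then x.toNat else L - (-x).toNat

lemma nIdx_lt (L : Nat) (x : Int) (h1 : -(L:Int) ≤ x) (h2 : x < L) : nIdx L x < L := by
  unfold nIdx; split_ifs <;> omega

lemma pyIdx_eq (L : Nat) (x : Int) (h1 : -(L:Int) ≤ x) (h2 : x < L) :
    PySem.List.pyIdx? L x = some (nIdx L x) := by
  simp only [PySem.List.pyIdx?, nIdx]; split_ifs <;> simp_all <;> omega

lemma getD_nIdx {α : Type} (p : List α) (x : Int) (h1 : -(p.length:Int) ≤ x) (h2 : x < p.length) (d : α) :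
    PySem.List.pyGetD p x d = p.getD (nIdx p.length x) d := by
  have hlt := nIdx_lt p.length x h1 h2
  simp [PySem.List.pyGetD, PySem.List.pyGet?, pyIdx_eq p.length x h1 h2,
    List.getD_eq_getElem?_getD, List.getElem?_eq_getElem hlt]

lemma setD_nIdx (p : List Int) (x v : Int) (h1 : -(p.length:Int) ≤ x) (h2 : x < p.length) :
    PySem.List.pySetD p x v = p.set (nIdx p.length x) v := by
  simp [PySem.List.pySetD, PySem.List.pySet?, pyIdx_eq p.length x h1 h2]

lemma pvFind_eq_root (p : List Int) (x : Int) (f : Nat) (h : PySem.List.pyGetD p x 0 = x) :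
    pvFind (f+1) p x = (p, PySem.List.pyGetD p x 0) := by
  simp only [pvFind]
  rw [if_neg (by simp [h])]

lemma pvFind_eq_rec (p : List Int) (x : Int) (f : Nat) (h : PySem.List.pyGetD p x 0 ≠ x) :
    pvFind (f+1) p x =
      (PySem.List.pySetD (pvFind f p (PySem.List.pyGetD p x 0)).1 x
        (pvFind f p (PySem.List.pyGetD p x 0)).2,
       (pvFind f p (PySem.List.pyGetD p x 0)).2) := by
  simp only [pvFind]
  rw [if_pos h]

lemma pvFind_spec (p : List Int) (hp : UFInv p) :
    ∀ j x f, -(p.length:Int) ≤ x → x < p.length → nIdx p.length x = j → j + 2 ≤ f →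
    (pvFind f p x).2 = rootOf p j ∧
    (pvFind f p x).1.length = p.length ∧ UFInv (pvFind f p x).1 ∧
    (∀ i, i < p.length → rootOf (pvFind f p x).1 i = rootOf p i) ∧
    (∀ k, j < k → k < p.length → (pvFind f p x).1.getD k 0 = p.getD k 0) := by
  intro j
  induction j using Nat.strong_induction_on with
  | _ j IH =>
    intro x f h1 h2 hj hf
    have hjlt : j < p.length := hj ▸ nIdx_lt p.length x h1 h2
    obtain ⟨f', rfl⟩ : ∃ f', f = f' + 1 := ⟨f - 1, by omega⟩
    have hget : PySem.List.pyGetD p x 0 = p.getD j 0 := by rw [getD_nIdx p x h1 h2 0, hj]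
    have hb := hp j hjlt
    by_cases hcase : p.getD j 0 = x
    · -- root reached: x ≥ 0, j = x.toNat, entry = x
      have hx0 : 0 ≤ x := le_trans hb.1 (le_of_eq hcase)
      have hjx : (j : Int) = x := by
        rw [← hj]; unfold nIdx; rw [if_pos hx0]; omega
      have hroot : rootOf p j = (j : Int) := by
        rw [rootOf_step p hp j hjlt, if_pos (by omega)]
      rw [pvFind_eq_root p x f' (by rw [hget, hcase])]
      exact ⟨by rw [hget]; omega, rfl, hp, fun i _ => rfl, fun k _ _ => rfl⟩
    · -- entry ≠ x: recurse on e := p.getD j 0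
      have hrec := pvFind_eq_rec p x f' (by rw [hget]; exact hcase)
      rw [hrec, hget]
      set e := p.getD j 0 with he_def
      have he0 : 0 ≤ e := hb.1
      have heLt : e < p.length := by omega
      have hje : nIdx p.length e = e.toNat := by unfold nIdx; rw [if_pos he0]
      rcases eq_or_ne e.toNat j with hej | hej
      · -- e = j (x is a negative alias of root j): inner call returns immediately
        have heJ : e = (j : Int) := by omega
        obtain ⟨f'', rfl⟩ : ∃ f'', f' = f'' + 1 := ⟨f' - 1, by omega⟩
        have hgetE : PySem.List.pyGetD p e 0 = e := by
          rw [getD_nIdx p e (by omega) heLt 0, hje, hej, ← he_def]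
        have hinner : pvFind (f''+1) p e = (p, e) := by
          rw [pvFind_eq_root p e f'' hgetE, hgetE]
        have hroot : rootOf p j = (j : Int) := by
          rw [rootOf_step p hp j hjlt, if_pos (by omega)]
        have hsetD : PySem.List.pySetD p x e = p.set j e := by
          rw [setD_nIdx p x e h1 h2, hj]
        have hwp := write_preserve p hp j hjlt e he0 (le_of_eq he_def) (by rw [hej])
        rw [hinner]
        simp only [hsetD]
        refine ⟨by omega, by simp, hwp.1, hwp.2, ?_⟩
        intro k hk1 hk2
        rw [getD_set_len p j e k hk2, if_neg (by omega)]
      · -- e.toNat < j: genuine recursion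
        have hejlt : e.toNat < j := by omega
        have hIH := IH e.toNat hejlt e f' (by omega) heLt hje (by omega)
        set pr := pvFind f' p e with hpr
        have hlen1 : pr.1.length = p.length := hIH.2.1
        have hufi1 : UFInv pr.1 := hIH.2.2.1
        have hrval : pr.2 = rootOf p e.toNat := hIH.1
        have hroot : rootOf p j = rootOf p e.toNat := by
          rw [rootOf_step p hp j hjlt, if_neg (by omega)]
        have hr0 : 0 ≤ pr.2 := by
          rw [hrval]; exact (rootOf_spec p hp e.toNat (by omega)).1
        have hrle : pr.2 ≤ (e.toNat : Int) := by
          rw [hrval]; exact (rootOf_spec p hp e.toNat (by omega)).2.1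
        have hentryj : pr.1.getD j 0 = e := hIH.2.2.2.2 j hejlt hjlt
        have hsetD : PySem.List.pySetD pr.1 x pr.2 = pr.1.set j pr.2 := by
          rw [setD_nIdx pr.1 x pr.2 (by rw [hlen1]; exact h1) (by rw [hlen1]; exact h2)]
          congr 1
          rw [hlen1, hj]
        have hr_toNat_lt : pr.2.toNat < p.length := by omega
        have hvr : rootOf pr.1 pr.2.toNat = rootOf pr.1 j := by
          rw [hIH.2.2.2.1 pr.2.toNat hr_toNat_lt, hIH.2.2.2.1 j hjlt, hroot, hrval]
          have := rootOf_idem p hp e.toNat (by omega)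
          rw [← hrval] at this ⊢
          exact this
        have hwp := write_preserve pr.1 hufi1 j (by omega) pr.2 hr0
          (by rw [hentryj]; omega) hvr
        simp only [hsetD]
        refine ⟨by rw [hrval, hroot], by simp [hlen1], hwp.1, ?_, ?_⟩
        · intro i hi
          rw [hwp.2 i (by omega), hIH.2.2.2.1 i hi]
        · intro k hk1 hk2
          rw [getD_set_len pr.1 j pr.2 k (by omega), if_neg (by omega),
            hIH.2.2.2.2 k (by omega) hk2]

lemma pvUnion_spec (p : List Int) (hp : UFInv p) (a b : Int)
    (ha1 : -(p.length:Int) ≤ a) (ha2 : a < p.length)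
    (hb1 : -(p.length:Int) ≤ b) (hb2 : b < p.length)
    (hne : rootOf p (nIdx p.length a) ≠ rootOf p (nIdx p.length b)) :
    (pvUnion p a b).length = p.length ∧ UFInv (pvUnion p a b) ∧
    ∀ i, i < p.length →
      rootOf (pvUnion p a b) i =
        (if rootOf p i = max (rootOf p (nIdx p.length a)) (rootOf p (nIdx p.length b))
         then min (rootOf p (nIdx p.length a)) (rootOf p (nIdx p.length b))
         else rootOf p i) := by
  simp only [pvUnion]
  have hja := nIdx_lt p.length a ha1 ha2
  have hjb := nIdx_lt p.length b hb1 hb2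
  set ja := nIdx p.length a with hja_def
  set jb := nIdx p.length b with hjb_def
  set ra := rootOf p ja with hra_def
  set rb := rootOf p jb with hrb_def
  have hspa := rootOf_spec p hp ja hja
  have hspb := rootOf_spec p hp jb hjb
  have hfa := pvFind_spec p hp ja a (p.length + 1) ha1 ha2 rfl (by omega)
  set fa := pvFind (p.length + 1) p a with hfa_def
  have hlen1 : fa.1.length = p.length := hfa.2.1
  have hufa : UFInv fa.1 := hfa.2.2.1
  have hjb' : nIdx fa.1.length b = jb := by rw [hlen1]
  have hfb := pvFind_spec fa.1 hufa jb b (fa.1.length + 1)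
    (by rw [hlen1]; exact hb1) (by rw [hlen1]; exact hb2) hjb' (by rw [hlen1]; omega)
  set fb := pvFind (fa.1.length + 1) fa.1 b with hfb_def
  have hlen2 : fb.1.length = p.length := by rw [hfb.2.1, hlen1]
  have hufb : UFInv fb.1 := hfb.2.2.1
  have hroots : ∀ i, i < p.length → rootOf fb.1 i = rootOf p i := by
    intro i hi
    rw [hfb.2.2.2.1 i (by omega), hfa.2.2.2.1 i hi]
  have hva : fa.2 = ra := hfa.1
  have hvb : fb.2 = rb := by
    rw [hfb.1, hfa.2.2.2.1 jb hjb]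
  have hfixa : fb.1.getD ra.toNat 0 = ra := by
    have h := rootOf_spec fb.1 hufb ja (by omega)
    rw [hroots ja hja] at h
    exact h.2.2
  have hfixb : fb.1.getD rb.toNat 0 = rb := by
    have h := rootOf_spec fb.1 hufb jb (by omega)
    rw [hroots jb hjb] at h
    exact h.2.2
  have hra0 : 0 ≤ ra := hspa.1
  have hrb0 : 0 ≤ rb := hspb.1
  have hralt : ra.toNat < p.length := by
    have := hspa.2.1; omega
  have hrblt : rb.toNat < p.length := by
    have := hspb.2.1; omega
  rw [hva, hvb]
  rcases lt_or_gt_of_ne hne with hlt | hlt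
  · rw [if_pos hlt]
    have hsd : PySem.List.pySetD fb.1 rb ra = fb.1.set rb.toNat ra := by
      rw [setD_nIdx fb.1 rb ra (by omega) (by omega)]
      congr 1
      unfold nIdx
      rw [if_pos hrb0]
    rw [hsd]
    have hwm := write_merge fb.1 hufb ra.toNat rb.toNat (by omega) (by omega)
      (by omega) (by rw [hfixa, Int.toNat_of_nonneg hra0])
      (by rw [hfixb, Int.toNat_of_nonneg hrb0])
    rw [Int.toNat_of_nonneg hra0, Int.toNat_of_nonneg hrb0] at hwm
    refine ⟨by simp [hlen2], hwm.1, ?_⟩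
    intro i hi
    rw [hwm.2 i (by omega), hroots i hi,
      max_eq_right (le_of_lt hlt), min_eq_left (le_of_lt hlt)]
  · rw [if_neg (by omega)]
    have hsd : PySem.List.pySetD fb.1 ra rb = fb.1.set ra.toNat rb := by
      rw [setD_nIdx fb.1 ra rb (by omega) (by omega)]
      congr 1
      unfold nIdx
      rw [if_pos hra0]
    rw [hsd]
    have hwm := write_merge fb.1 hufb rb.toNat ra.toNat (by omega) (by omega)
      (by omega) (by rw [hfixb, Int.toNat_of_nonneg hrb0])
      (by rw [hfixa, Int.toNat_of_nonneg hra0])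
    rw [Int.toNat_of_nonneg hra0, Int.toNat_of_nonneg hrb0] at hwm
    refine ⟨by simp [hlen2], hwm.1, ?_⟩
    intro i hi
    rw [hwm.2 i (by omega), hroots i hi,
      max_eq_left (le_of_lt hlt), min_eq_right (le_of_lt hlt)]

def RelN (n : Int) (p comp : List Int) : Prop :=
  p.length = (n + 1).toNat ∧ comp.length = p.length ∧ UFInv p ∧
  ∀ i, i < p.length → comp.getD i 0 = rootOf p i

lemma getD_map_lt (l : List Int) (f : Int → Int) (i : Nat) (hi : i < l.length) :
    (l.map f).getD i 0 = f (l.getD i 0) := by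
  simp [List.getD_eq_getElem?_getD, List.getElem?_eq_getElem hi]

lemma edge_sim (n : Int) (p comp : List Int) (h : RelN n p comp) (u v : Int)
    (hu : -(n+1) ≤ u ∧ u ≤ n) (hv : -(n+1) ≤ v ∧ v ≤ n) (i : Int) (nums : List Int)
    (hgu : PySem.List.pyGetD nums (i+1) 0 = u) (hgv : PySem.List.pyGetD nums (i+2) 0 = v) :
    RelN n (aEdge nums p i) (bMerge comp (u, v)) := by
  obtain ⟨hplen, hclen, hp, hcomp⟩ := h
  have hn0 : 0 ≤ n := by omega
  have hlen : (p.length : Int) = n + 1 := by rw [hplen]; omega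
  have hu1 : -(p.length:Int) ≤ u := by omega
  have hu2 : u < p.length := by omega
  have hv1 : -(p.length:Int) ≤ v := by omega
  have hv2 : v < p.length := by omega
  have hju := nIdx_lt p.length u hu1 hu2
  have hjv := nIdx_lt p.length v hv1 hv2
  set ju := nIdx p.length u with hju_def
  set jv := nIdx p.length v with hjv_def
  simp only [aEdge, bMerge, hgu, hgv]
  have hfu := pvFind_spec p hp ju u (p.length + 1) hu1 hu2 rfl (by omega)
  set fu := pvFind (p.length + 1) p u with hfu_def
  have hlen1 : fu.1.length = p.length := hfu.2.1
  have hufu : UFInv fu.1 := hfu.2.2.1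
  have hfv := pvFind_spec fu.1 hufu jv v (fu.1.length + 1)
    (by rw [hlen1]; exact hv1) (by rw [hlen1]; exact hv2) (by rw [hlen1]) (by rw [hlen1]; omega)
  set fv := pvFind (fu.1.length + 1) fu.1 v with hfv_def
  have hlen2 : fv.1.length = p.length := by rw [hfv.2.1, hlen1]
  have hufv : UFInv fv.1 := hfv.2.2.1
  have hroots : ∀ k, k < p.length → rootOf fv.1 k = rootOf p k := by
    intro k hk
    rw [hfv.2.2.2.1 k (by omega), hfu.2.2.2.1 k hk]
  set ru := rootOf p ju with hru_def
  set rv := rootOf p jv with hrv_def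
  have hvu : fu.2 = ru := hfu.1
  have hvv : fv.2 = rv := by rw [hfv.1, hfu.2.2.2.1 jv hjv]
  have hcu : PySem.List.pyGetD comp u 0 = ru := by
    rw [getD_nIdx comp u (by omega) (by omega) 0]
    have : nIdx comp.length u = ju := by rw [hclen]
    rw [this, hcomp ju hju]
  have hcv : PySem.List.pyGetD comp v 0 = rv := by
    rw [getD_nIdx comp v (by omega) (by omega) 0]
    have : nIdx comp.length v = jv := by rw [hclen]
    rw [this, hcomp jv hjv]
  rw [hvu, hvv, hcu, hcv]
  by_cases hne : ru = rv
  · rw [if_neg (by simpa using hne), if_neg (by simpa using hne)]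
    refine ⟨by omega, by omega, hufv, fun k hk => ?_⟩
    rw [hcomp k (by omega), hroots k (by omega)]
  · rw [if_pos hne, if_pos hne]
    have hnIu : nIdx fv.1.length u = ju := by rw [hlen2]
    have hnIv : nIdx fv.1.length v = jv := by rw [hlen2]
    have hun := pvUnion_spec fv.1 hufv u v (by omega) (by omega) (by omega) (by omega)
      (by rw [hnIu, hnIv, hroots ju hju, hroots jv hjv]; exact hne)
    rw [hnIu, hnIv, hroots ju hju, hroots jv hjv] at hun
    have hunlen : (pvUnion fv.1 u v).length = p.length := by omega
    refine ⟨by omega, by simp [hunlen]; omega, hun.2.1, ?_⟩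
    intro k hk
    rw [getD_map_lt comp _ k (by omega), hun.2.2 k (by omega), hroots k (by omega),
      hcomp k (by omega)]
    rw [← hru_def, ← hrv_def]
    rcases lt_trichotomy ru rv with hlt | heq | hlt
    · simp only [if_pos hlt, max_eq_right (le_of_lt hlt), min_eq_left (le_of_lt hlt)]
    · exact absurd heq hne
    · simp only [if_neg (show ¬ ru < rv by omega), max_eq_left (le_of_lt hlt),
        min_eq_right (le_of_lt hlt)]

lemma foldl_sim {α β γ : Type} (R : α → β → Prop) (fa : α → γ → α) (fb : β → γ → β) :
    ∀ (l : List γ), (∀ x ∈ l, ∀ a b, R a b → R (fa a x) (fb b x)) →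
    ∀ a b, R a b → R (l.foldl fa a) (l.foldl fb b) := by
  intro l
  induction l with
  | nil => intro _ a b h; exact h
  | cons x xs ih =>
    intro hstep a b h
    exact ih (fun y hy => hstep y (List.mem_cons_of_mem x hy)) _ _
      (hstep x (List.mem_cons_self) a b h)

lemma pairs_eq (l0 : Int) (rest : List Int)
    (h1 : (0 ≤ l0 → (l0 ≤ 1 ∨ l0 ≤ (rest.length : Int))) ∧
          (l0 < 0 → l0 + ((rest.length : Int) + 1) ≤ 1)) :
    (PySem.List.slice (l0::rest) (some 1) (some l0)).zip
      (PySem.List.slice (l0::rest) (some 2) (some (l0+1))) =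
    (PySem.List.pyRange 0 (l0-1) 1).map
      (fun i => (PySem.List.pyGetD (l0::rest) (i+1) 0, PySem.List.pyGetD (l0::rest) (i+2) 0)) := by
  rcases lt_or_ge l0 0 with hneg | h0
  · -- negative declared count within Pre_: both sides are empty
    rw [PySem.List.pyRange_one_eq_nil (by omega), List.map_nil]
    have hnil : PySem.List.slice (l0::rest) (some 1) (some l0) = [] := by
      apply List.eq_nil_of_length_eq_zero
      rw [PySem.List.length_slice]
      have ha : PySem.List.clampIdx (l0::rest).length l0 ≤ 1 := by
        simp only [PySem.List.clampIdx]
        split_ifs <;> simp <;> omega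
      have hb : PySem.List.clampIdx (l0::rest).length 1 = 1 := by
        have := PySem.List.clampIdx_natCast (l0::rest).length 1
        simp at this
        simpa using this
      omega
    rw [hnil]
    simp
  · have hs1 : PySem.List.slice (l0::rest) (some 1) (some l0) = rest.take (l0.toNat - 1) := by
      rw [PySem.List.slice_toNat _ (by omega : (0:Int) ≤ 1) h0]
      norm_num
    have hs2 : PySem.List.slice (l0::rest) (some 2) (some (l0+1)) =
        (rest.drop 1).take (l0.toNat - 1) := by
      rw [PySem.List.slice_toNat _ (by omega : (0:Int) ≤ 2) (by omega)]
      have : (l0+1).toNat - Int.toNat 2 = l0.toNat - 1 := by omega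
      rw [this, show Int.toNat 2 = 2 from rfl, List.drop_succ_cons]
    rw [hs1, hs2]
    rcases le_or_gt l0 1 with hle | hgt
    · rw [PySem.List.pyRange_one_eq_nil (by omega), List.map_nil]
      have h10 : l0.toNat - 1 = 0 := by omega
      rw [h10, List.take_zero]
      simp
    · have hrl : l0 ≤ (rest.length : Int) := by
        rcases h1.1 h0 with h | h
        · omega
        · exact h
      apply List.ext_getElem
      · simp [PySem.List.length_pyRange_one]
        omega
      · intro k hk1 hk2
        have hkb : k < l0.toNat - 1 := by
          simp at hk1
          omega
        have hkr : k + 1 < rest.length := by omega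
        rw [List.getElem_zip, List.getElem_map, PySem.List.getElem_pyRange_one]
        have e1 : (rest.take (l0.toNat - 1))[k]'(by simp; omega) = rest[k]'(by omega) :=
          List.getElem_take
        have e2 : ((rest.drop 1).take (l0.toNat - 1))[k]'(by simp; omega) = rest[k+1]'hkr := by
          rw [List.getElem_take, List.getElem_drop]
          congr 1
          omega
        rw [e1, e2]
        have g1 : PySem.List.pyGetD (l0::rest) ((0 + (k:Int)) + 1) 0 = rest[k]'(by omega) := by
          have hc : ((0 + (k:Int)) + 1) = ((k+1 : Nat) : Int) := by push_cast; ring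
          rw [hc, PySem.List.pyGetD_natCast, List.getD_eq_getElem?_getD,
            List.getElem?_eq_getElem (by simpa using by omega : k + 1 < (l0::rest).length)]
          simp
        have g2 : PySem.List.pyGetD (l0::rest) ((0 + (k:Int)) + 2) 0 = rest[k+1]'hkr := by
          have hc : ((0 + (k:Int)) + 2) = ((k+2 : Nat) : Int) := by push_cast; ring
          rw [hc, PySem.List.pyGetD_natCast, List.getD_eq_getElem?_getD,
            List.getElem?_eq_getElem (by simpa using by omega : k + 2 < (l0::rest).length)]
          simp
        rw [g1, g2]

lemma party_inner_sim (n : Int) (l0 : Int) (rest : List Int)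
    (h1 : (0 ≤ l0 → (l0 ≤ 1 ∨ l0 ≤ (rest.length : Int))) ∧
          (l0 < 0 → l0 + ((rest.length : Int) + 1) ≤ 1))
    (hmem : ∀ x ∈ rest, -(n+1) ≤ x ∧ x ≤ n)
    (p comp : List Int) (h : RelN n p comp) :
    RelN n ((PySem.List.pyRange 0 (l0-1) 1).foldl (aEdge (l0::rest)) p)
      (((PySem.List.slice (l0::rest) (some 1) (some l0)).zip
        (PySem.List.slice (l0::rest) (some 2) (some (l0+1)))).foldl bMerge comp) := by
  rw [pairs_eq l0 rest h1, List.foldl_map]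
  refine foldl_sim (RelN n) _ _ _ ?_ p comp h
  intro i hi pa cb hrel
  have hi' := (PySem.List.mem_pyRange_one).1 hi
  have hl2 : 2 ≤ l0 := by omega
  have hrl : l0 ≤ (rest.length : Int) := by
    rcases h1.1 (by omega) with h | h
    · omega
    · exact h
  have hu_mem : PySem.List.pyGetD (l0::rest) (i+1) 0 ∈ rest := by
    have hc : (i+1) = (((i.toNat+1) : Nat) : Int) := by omega
    rw [hc, PySem.List.pyGetD_natCast, List.getD_cons_succ, List.getD_eq_getElem?_getD,
      List.getElem?_eq_getElem (by omega : i.toNat < rest.length)]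
    exact List.getElem_mem _
  have hv_mem : PySem.List.pyGetD (l0::rest) (i+2) 0 ∈ rest := by
    have hc : (i+2) = (((i.toNat+2) : Nat) : Int) := by omega
    rw [hc, PySem.List.pyGetD_natCast, List.getD_cons_succ, List.getD_eq_getElem?_getD,
      List.getElem?_eq_getElem (by omega : i.toNat + 1 < rest.length)]
    exact List.getElem_mem _
  exact edge_sim n pa cb hrel _ _ (hmem _ hu_mem) (hmem _ hv_mem) i (l0::rest) rfl rfl

def PRel (n : Int) (stA stB : List Int × List (List Int)) : Prop :=
  RelN n stA.1 stB.1 ∧ stA.2 = stB.2 ∧ ∀ q ∈ stA.2, ∀ x ∈ q, -(n+1) ≤ x ∧ x ≤ n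

lemma party_step (n m : Int) (parties : List (List Int)) (hm : m ≤ (parties.length : Int))
    (hpre : ∀ nums ∈ parties.take m.toNat,
      nums ≠ [] ∧
      (0 ≤ nums.headI → (nums.headI ≤ 1 ∨ nums.headI ≤ (nums.length : Int) - 1)) ∧
      (nums.headI < 0 → nums.headI + (nums.length : Int) ≤ 1) ∧
      ∀ x ∈ nums.tail, -(n+1) ≤ x ∧ x ≤ n) :
    ∀ i ∈ PySem.List.pyRange 0 m 1, ∀ stA stB, PRel n stA stB →
      PRel n (aParty parties stA i) (bParty parties stB i) := by
  intro i hi stA stB hrel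
  have hi' := (PySem.List.mem_pyRange_one).1 hi
  have hil : i < (parties.length : Int) := by omega
  have hgnums : PySem.List.pyGetD parties i [] = parties.getD i.toNat [] := by
    rw [getD_nIdx parties i (by omega) (by omega) []]
    congr 1
    unfold nIdx
    rw [if_pos (by omega)]
  have hitn : i.toNat < parties.length := by omega
  have hitm : i.toNat < m.toNat := by omega
  have hnums_eq : parties.getD i.toNat [] = parties[i.toNat] := by
    rw [List.getD_eq_getElem?_getD, List.getElem?_eq_getElem hitn]
    rfl
  have htake : parties[i.toNat] ∈ parties.take m.toNat := by
    have hlt : i.toNat < (parties.take m.toNat).length := by simp; omega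
    have : (parties.take m.toNat)[i.toNat] = parties[i.toNat] := List.getElem_take
    rw [← this]
    exact List.getElem_mem _
  obtain ⟨hnn, h1a, h1b, hmem⟩ := hpre _ htake
  obtain ⟨l0, rest, hnums⟩ := List.exists_cons_of_ne_nil hnn
  have hgnums2 : PySem.List.pyGetD parties i [] = l0 :: rest := by
    rw [hgnums, hnums_eq, hnums]
  have hleng : PySem.List.pyGetD (l0 :: rest) 0 0 = l0 := PySem.List.pyGetD_zero_cons _ _ _
  have hhead : parties[i.toNat].headI = l0 := by rw [hnums]; rfl
  have htail : parties[i.toNat].tail = rest := by rw [hnums]; rfl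
  rw [hhead] at h1a h1b
  rw [htail] at hmem
  have hlen' : (parties[i.toNat].length : Int) = (rest.length : Int) + 1 := by
    rw [hnums]; simp
  simp only [aParty, bParty, hgnums2, hleng]
  have hslice : PySem.List.slice (l0::rest) (some 1) none = rest := by
    rw [PySem.List.slice_from_one]
    simp
  refine ⟨?_, ?_, ?_⟩
  · refine party_inner_sim n l0 rest ⟨?_, ?_⟩ hmem stA.1 stB.1 hrel.1
    · intro h0'
      rcases h1a h0' with h | h
      · exact Or.inl h
      · right; omega
    · intro hneg'
      have := h1b hneg'
      omega
  · rw [hrel.2.1, hslice]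
  · rw [hslice]
    intro q hq
    rcases List.mem_append.1 hq with hq | hq
    · exact hrel.2.2 q hq
    · rw [List.mem_singleton.1 hq]
      exact hmem

lemma find_label (n : Int) (p comp : List Int) (h : RelN n p comp) (num : Int)
    (hb : -(n+1) ≤ num ∧ num ≤ n) :
    (pvFind (p.length + 1) p num).2 = PySem.List.pyGetD comp num 0 ∧
    RelN n (pvFind (p.length + 1) p num).1 comp := by
  obtain ⟨hplen, hclen, hp, hcomp⟩ := h
  have hn0 : 0 ≤ n := by omega
  have hlen : (p.length : Int) = n + 1 := by rw [hplen]; omega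
  have h1 : -(p.length:Int) ≤ num := by omega
  have h2 : num < p.length := by omega
  have hj := nIdx_lt p.length num h1 h2
  have hf := pvFind_spec p hp (nIdx p.length num) num (p.length + 1) h1 h2 rfl (by omega)
  have hc : PySem.List.pyGetD comp num 0 = rootOf p (nIdx p.length num) := by
    rw [getD_nIdx comp num (by omega) (by omega) 0]
    have : nIdx comp.length num = nIdx p.length num := by rw [hclen]
    rw [this, hcomp _ hj]
  refine ⟨by rw [hf.1, hc], by omega, by omega, hf.2.2.1, ?_⟩
  intro k hk
  rw [hcomp k (by omega), hf.2.2.2.1 k (by omega)]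

lemma know_sim (n : Int) (comp : List Int) :
    ∀ (ks : List Int), (∀ x ∈ ks, -(n+1) ≤ x ∧ x ≤ n) →
    ∀ p rootA rootB, RelN n p comp → rootA = rootB →
    RelN n (ks.foldl aKnow (p, rootA)).1 comp ∧
    (ks.foldl aKnow (p, rootA)).2 =
      ks.foldl (fun r x => PySem.Set.add r (PySem.List.pyGetD comp x 0)) rootB := by
  intro ks
  induction ks with
  | nil => intro _ p rootA rootB h hr; exact ⟨h, hr⟩
  | cons num ks ih =>
    intro hbs p rootA rootB h hr
    have hfl := find_label n p comp h num (hbs num List.mem_cons_self)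
    simp only [List.foldl_cons]
    have hstep : aKnow (p, rootA) num =
        ((pvFind (p.length + 1) p num).1,
         PySem.Set.add rootB (PySem.List.pyGetD comp num 0)) := by
      simp only [aKnow]
      rw [hr, hfl.1]
    rw [hstep]
    exact ih (fun x hx => hbs x (List.mem_cons_of_mem _ hx)) _ _ _ hfl.2 rfl

lemma check_sim (n : Int) (comp : List Int) :
    ∀ (mems : List Int), (∀ x ∈ mems, -(n+1) ≤ x ∧ x ≤ n) →
    ∀ p root poss, RelN n p comp →
    RelN n (mems.foldl aCheck (p, root, poss)).1 comp ∧
    (mems.foldl aCheck (p, root, poss)).2.1 = (mems.foldl (bCheck comp) (root, poss)).1 ∧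
    (mems.foldl aCheck (p, root, poss)).2.2 = (mems.foldl (bCheck comp) (root, poss)).2 := by
  intro mems
  induction mems with
  | nil => intro _ p root poss h; exact ⟨h, rfl, rfl⟩
  | cons num ms ih =>
    intro hbs p root poss h
    have hfl := find_label n p comp h num (hbs num List.mem_cons_self)
    simp only [List.foldl_cons]
    have hstep : aCheck (p, root, poss) num =
        ((pvFind (p.length + 1) p num).1, bCheck comp (root, poss) num) := by
      simp only [aCheck, bCheck]
      rw [hfl.1]
      split_ifs <;> rfl
    rw [hstep]
    exact ih (fun x hx => hbs x (List.mem_cons_of_mem _ hx)) _ _ _ hfl.2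

lemma ploop_sim (n : Int) (comp : List Int) :
    ∀ (party : List (List Int)), (∀ q ∈ party, ∀ x ∈ q, -(n+1) ≤ x ∧ x ≤ n) →
    ∀ p root res, RelN n p comp →
    (party.foldl aPartyLoop (p, root, res)).2.1 = (party.foldl (bPartyLoop comp) (root, res)).1 ∧
    (party.foldl aPartyLoop (p, root, res)).2.2 = (party.foldl (bPartyLoop comp) (root, res)).2 := by
  intro party
  induction party with
  | nil => intro _ p root res h; exact ⟨rfl, rfl⟩
  | cons q qs ih =>
    intro hbs p root res h
    have hcs := check_sim n comp q (hbs q List.mem_cons_self) p root true h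
    simp only [List.foldl_cons]
    have hstep : aPartyLoop (p, root, res) q =
        ((q.foldl aCheck (p, root, true)).1, bPartyLoop comp (root, res) q) := by
      simp only [aPartyLoop, bPartyLoop]
      rw [hcs.2.1, hcs.2.2]
    rw [hstep]
    exact ih (fun x hx => hbs x (List.mem_cons_of_mem _ hx)) _ _ _ hcs.1

theorem main_eq (n : Int) (m : Int) (know : List Int) (parties : List (List Int))
    (hm : m ≤ (parties.length : Int))
    (hpre2 : ∀ nums ∈ parties.take m.toNat,
      nums ≠ [] ∧
      (0 ≤ nums.headI → (nums.headI ≤ 1 ∨ nums.headI ≤ (nums.length : Int) - 1)) ∧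
      (nums.headI < 0 → nums.headI + (nums.length : Int) ≤ 1) ∧
      ∀ x ∈ nums.tail, -(n+1) ≤ x ∧ x ≤ n)
    (hpre3 : ∀ x ∈ know.tail, -(n+1) ≤ x ∧ x ≤ n) :
    myResult n m know parties = myResult_alt n m know parties := by
  have hlen0 : (PySem.List.pyRange 0 (n + 1) 1).length = (n + 1).toNat := by
    rw [PySem.List.length_pyRange_one]
    congr 1
    omega
  have hent : ∀ i, i < (PySem.List.pyRange 0 (n + 1) 1).length →
      (PySem.List.pyRange 0 (n + 1) 1).getD i 0 = (i : Int) := by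
    intro i hi
    rw [List.getD_eq_getElem?_getD, List.getElem?_eq_getElem hi, Option.getD_some]
    simp [PySem.List.getElem_pyRange_one]
  have hUF : UFInv (PySem.List.pyRange 0 (n + 1) 1) := by
    intro i hi
    rw [hent i hi]
    omega
  have hroot0 : ∀ i, i < (PySem.List.pyRange 0 (n + 1) 1).length →
      rootOf (PySem.List.pyRange 0 (n + 1) 1) i = (i : Int) := by
    intro i hi
    rw [rootOf_step _ hUF i hi, if_pos (hent i hi)]
  have hrel0 : RelN n (PySem.List.pyRange 0 (n + 1) 1) (PySem.List.pyRange 0 (n + 1) 1) :=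
    ⟨hlen0, rfl, hUF, fun i hi => (hent i hi).trans (hroot0 i hi).symm⟩
  simp only [myResult, myResult_alt]
  set p0 := PySem.List.pyRange 0 (n + 1) 1 with hp0_def
  have hP := foldl_sim (PRel n) (aParty parties) (bParty parties) (PySem.List.pyRange 0 m 1)
    (party_step n m parties hm hpre2) (p0, []) (p0, [])
    ⟨hrel0, rfl, by simp⟩
  set s1A := (PySem.List.pyRange 0 m 1).foldl (aParty parties) (p0, []) with hs1A_def
  set s1B := (PySem.List.pyRange 0 m 1).foldl (bParty parties) (p0, []) with hs1B_def
  have hsliceK : PySem.List.slice know (some 1) none = know.tail := by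
    rw [PySem.List.slice_from_one]
  rw [hsliceK]
  have hK := know_sim n s1B.1 know.tail hpre3 s1A.1 PySem.Set.empty PySem.Set.empty hP.1 rfl
  set s2 := know.tail.foldl aKnow (s1A.1, PySem.Set.empty) with hs2_def
  have hL := ploop_sim n s1B.1 s1A.2 hP.2.2 s2.1 s2.2 0 hK.1
  rw [← hK.2, ← hP.2.1]
  exact hL.2

-- ===== VERDICT (by name: the statement is the Claim_ definition above) =====
theorem myResult_spec : Claim_equal_myResult := by
  intro n m know parties _hdom hpre
  unfold Pre_myResult at hpre
  unfold Spec_myResult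
  exact main_eq n m know parties hpre.1 hpre.2.1 hpre.2.2
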